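-- pv_equiv track=rewrite | github.com/jayak0776/Accenture-Reinprep-Problems-Codes | RienPrep/P75NumHug.py | calHuge
-- ===== SOURCE A (Python) =====
-- def is_prime(n):
--     if n==2:
--         return True
--     if n%2==0 or n<2:
--         return False
--     for i in range(3,int(n**0.5)+1,2):
--         if n%i==0:
--             return False
--     return True
--
-- def calHuge(n):
--     li=[]
--     li.append(1)
--     for i in range(2,n+1):
--         li.append(i|li[i-2])
--     li.sort(reverse=True)
--     for i in li:
--         if is_prime(i):
--             return i
--     return -1
-- ===== SOURCE B (Python) =====
-- def _is_prime(m):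
--     if m % 2 == 0:
--         return m == 2
--     d = 3
--     while d * d <= m:
--         if m % d == 0:
--             return False
--         d += 2
--     return True
--
-- def calHuge(n):
--     # The prefix-OR list A builds contains exactly the values 2^k - 1 for
--     # k = 1 .. max(n,1).bit_length(); test those O(log n) candidates descending.
--     k = max(n, 1).bit_length()
--     while k >= 2:
--         m = (1 << k) - 1
--         if _is_prime(m):
--             return m
--         k -= 1
--     return -1
-- ===== Notes on version B (the rewrite author's own statement) =====
-- stated objective: faster
-- what changed: B replaces building the n-element prefix-OR list, sorting it, and scanning, by the observation that the prefix ORs are exactly the Mersenne numbers 2^k-1 for k up to n.bit_length(), so it trial-divides only those O(log n) candidates in descending order.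
import Mathlib
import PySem

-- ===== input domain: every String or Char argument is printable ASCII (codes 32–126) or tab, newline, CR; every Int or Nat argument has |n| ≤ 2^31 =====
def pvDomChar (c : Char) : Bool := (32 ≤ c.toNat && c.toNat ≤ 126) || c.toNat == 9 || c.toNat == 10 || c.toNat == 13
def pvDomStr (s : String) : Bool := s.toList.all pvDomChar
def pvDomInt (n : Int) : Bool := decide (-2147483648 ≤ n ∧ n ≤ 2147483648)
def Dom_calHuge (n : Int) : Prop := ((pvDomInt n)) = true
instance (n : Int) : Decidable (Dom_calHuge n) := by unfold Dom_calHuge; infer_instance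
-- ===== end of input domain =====

-- B replaces A's build-prefix-OR-list / sort / scan (the prefix ORs are exactly the
-- Mersenne numbers 2^k-1, k ≤ n.bit_length()) by trial-dividing those O(log n)
-- candidates in descending order; measurably faster on large n.

-- ===== PORT A =====
-- int(n**0.5) is ported as Nat.sqrt (exact for the nonnegative values this code feeds it)
def isPrimeA (n : Int) : Bool :=
  if n == 2 then true
  else if PySem.Int.mod n 2 == 0 || n < 2 then false
  else
    (PySem.List.pyRange 3 ((Nat.sqrt n.toNat : Int) + 1) 2).all
      (fun i => !(PySem.Int.mod n i == 0))

-- the early-returning 'for i in li: if is_prime(i): return i' loop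
def firstPrimeA : List Int → Int
  | [] => -1
  | x :: xs => if isPrimeA x then x else firstPrimeA xs

def calHuge (n : Int) : Int :=
  let li : List Int :=
    (PySem.List.pyRange 2 (n + 1) 1).foldl
      (fun li i => li ++ [Int.lor i (PySem.List.pyGetD li (i - 2) 0)]) [1]
  firstPrimeA (PySem.List.sorted li (fun x => x) true)

-- ===== PORT B =====
-- the 'while d*d <= m' loop; fuel only makes it total (fuel = m+1 always suffices, proved below)
def trialB (m : Nat) : Nat → Nat → Bool
  | 0, _ => true
  | fuel + 1, d =>
    if d * d ≤ m then (if m % d == 0 then false else trialB m fuel (d + 2)) else true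

def isPrimeB (m : Int) : Bool :=
  if PySem.Int.mod m 2 == 0 then m == 2 else trialB m.toNat (m.toNat + 1) 3

-- the 'while k >= 2' countdown loop
def loopB : Nat → Int
  | 0 => -1
  | k + 1 =>
    if k + 1 ≥ 2 then
      let m : Int := 2 ^ (k + 1) - 1
      if isPrimeB m then m else loopB k
    else -1

def calHuge_alt (n : Int) : Int := loopB (Nat.size (max n 1).toNat)

-- ===== PRECONDITION & SPEC =====
def Spec_calHuge (n : Int) (out : Int) : Prop := out = calHuge_alt n
instance (n : Int) (out : Int) : Decidable (Spec_calHuge n out) := by unfold Spec_calHuge; infer_instance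

-- ===== CLAIM (what is proved, stated in full; the proofs are below) =====
def Claim_equal_calHuge : Prop := ∀ (n : Int), Dom_calHuge n → Spec_calHuge n (calHuge n)

-- ===== LEMMAS AND PROOFS =====

-- A's descending scan written over the bit-length k: first prime among 2^k-1, 2^(k-1)-1, …
def scanK : Nat → Int
  | 0 => -1
  | k + 1 =>
    let m : Int := 2 ^ (k + 1) - 1
    if isPrimeA m then m else scanK k

-- the list A builds: j-th element (0-based) is 2^(bit-length of j+1) - 1
def liSpec (N : Nat) : List Int := (List.range N).map (fun j => (2 : Int) ^ Nat.size (j + 1) - 1)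

theorem scanK_succ (k : Nat) :
    scanK (k + 1) = if isPrimeA ((2 : Int) ^ (k + 1) - 1) then (2 : Int) ^ (k + 1) - 1 else scanK k := rfl

theorem size_succ_cases (N : Nat) : Nat.size (N + 1) = Nat.size N ∨ Nat.size (N + 1) = Nat.size N + 1 := by
  have h1 : Nat.size N ≤ Nat.size (N + 1) := Nat.size_le_size (by omega)
  have h2 : Nat.size (N + 1) ≤ Nat.size N + 1 := by
    rw [Nat.size_le]
    have := Nat.lt_size_self N
    have : (2 : Nat) ^ Nat.size N ≤ 2 ^ (Nat.size N + 1) := Nat.pow_le_pow_right (by omega) (by omega)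
    omega
  omega

theorem lor_mers (i : Nat) (h : 1 ≤ i) :
    Nat.lor (i + 1) (2 ^ Nat.size i - 1) = 2 ^ Nat.size (i + 1) - 1 := by
  apply Nat.eq_of_testBit_eq
  intro j
  have hs : Nat.size i ≤ Nat.size (i + 1) := Nat.size_le_size (by omega)
  have hlt : i + 1 < 2 ^ Nat.size (i + 1) := Nat.lt_size_self (i + 1)
  have hile : i < 2 ^ Nat.size i := Nat.lt_size_self i
  rw [show Nat.lor (i + 1) (2 ^ Nat.size i - 1) = (i + 1) ||| (2 ^ Nat.size i - 1) from rfl]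
  rw [Nat.testBit_lor, Nat.testBit_two_pow_sub_one, Nat.testBit_two_pow_sub_one]
  by_cases hj1 : j < Nat.size i
  · simp [hj1, Nat.lt_of_lt_of_le hj1 hs]
  · by_cases hj2 : j < Nat.size (i + 1)
    · -- size i ≤ j < size (i+1): forces i + 1 = 2 ^ size i and j = size i
      have hcases := size_succ_cases i
      have hj : j = Nat.size i := by omega
      have hpow : i + 1 = 2 ^ Nat.size i := by
        have : ¬ (i + 1 < 2 ^ Nat.size i) := by
          intro hc
          have : Nat.size (i + 1) ≤ Nat.size i := Nat.size_le.mpr hc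
          omega
        omega
      subst hj
      have hbit : (i + 1).testBit i.size = true := by
        rw [hpow]; exact Nat.testBit_two_pow_self
      simp [hbit, hj2]
    · have : (i + 1).testBit j = false := by
        apply Nat.testBit_lt_two_pow
        calc i + 1 < 2 ^ Nat.size (i + 1) := hlt
          _ ≤ 2 ^ j := Nat.pow_le_pow_right (by omega) (by omega)
      simp [this, hj1, hj2]

theorem liSpec_succ (N : Nat) :
    liSpec (N + 1) = liSpec N ++ [(2 : Int) ^ Nat.size (N + 1) - 1] := by
  unfold liSpec
  rw [List.range_succ, List.map_append]
  rfl

theorem liSpec_length (N : Nat) : (liSpec N).length = N := by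
  unfold liSpec; simp

-- L1: the foldl builds exactly liSpec
theorem build_eq_liSpec (N : Nat) (h : 1 ≤ N) :
    (PySem.List.pyRange 2 ((N : Int) + 1) 1).foldl
      (fun li i => li ++ [Int.lor i (PySem.List.pyGetD li (i - 2) 0)]) [1] = liSpec N := by
  induction N with
  | zero => omega
  | succ N ih =>
    by_cases hN : 1 ≤ N
    · have hrange : PySem.List.pyRange 2 ((N : Int) + 1 + 1) 1
          = PySem.List.pyRange 2 ((N : Int) + 1) 1 ++ [(N : Int) + 1] := by
        have := PySem.List.pyRange_one_succ_right (a := 2) (b := (N : Int) + 1) (by omega)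
        simpa using this
      have : ((N : Nat) : Int) + 1 + 1 = ((N + 1 : Nat) : Int) + 1 := by push_cast; ring
      rw [← this, hrange, List.foldl_append, ih hN]
      simp only [List.foldl_cons, List.foldl_nil]
      have hget : PySem.List.pyGetD (liSpec N) ((N : Int) + 1 - 2) 0
          = (2 : Int) ^ Nat.size N - 1 := by
        have h2 : ((N : Int) + 1 - 2) = ((N - 1 : Nat) : Int) := by push_cast [hN]; omega
        rw [h2, PySem.List.pyGetD_eq_getElem (h0 := by omega)
          (h1 := by rw [liSpec_length]; push_cast; omega)]
        unfold liSpec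
        rw [List.getElem_map, List.getElem_range]
        simp
        congr 1
        omega
      rw [hget]
      have hlor : Int.lor ((N : Int) + 1) ((2 : Int) ^ Nat.size N - 1)
          = (2 : Int) ^ Nat.size (N + 1) - 1 := by
        have e1 : ((N : Int) + 1) = (((N + 1 : Nat) : Nat) : Int) := by push_cast; ring
        have e2 : ((2 : Int) ^ Nat.size N - 1) = (((2 ^ Nat.size N - 1 : Nat) : Nat) : Int) := by
          have := Nat.one_le_two_pow (n := Nat.size N)
          push_cast [this]
          omega
        rw [e1, e2]
        have : Int.lor ((N + 1 : Nat) : Int) ((2 ^ Nat.size N - 1 : Nat) : Int)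
            = ((Nat.lor (N + 1) (2 ^ Nat.size N - 1) : Nat) : Int) := rfl
        rw [this, lor_mers N hN]
        have := Nat.one_le_two_pow (n := Nat.size (N + 1))
        push_cast [this]
        omega
      rw [hlor, liSpec_succ]
    · have hN0 : N = 0 := by omega
      subst hN0
      have hc : (((0 + 1 : Nat) : Int) + 1) = 2 := by norm_num
      rw [hc, PySem.List.pyRange_one_eq_nil (by omega)]
      simp only [List.foldl_nil]
      norm_num [liSpec, Nat.size_one]

-- L2: a reverse-sort of a nondecreasing Int list is its reverse
theorem sorted_rev_of_pairwise (l : List Int) (h : l.Pairwise (· ≤ ·)) :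
    PySem.List.sorted l (fun x => x) true = l.reverse := by
  apply List.Perm.eq_of_pairwise (le := fun a b : Int => b ≤ a)
  · intro a b _ _ h1 h2; omega
  · exact PySem.List.sorted_pairwise_rev l (fun x => x)
  · rw [List.pairwise_reverse]; exact h
  · exact (PySem.List.sorted_perm l (fun x => x) true).trans (List.reverse_perm l).symm

theorem liSpec_pairwise (N : Nat) : (liSpec N).Pairwise (· ≤ ·) := by
  unfold liSpec
  apply List.Pairwise.map
  · intro a b hab
    have : Nat.size (a + 1) ≤ Nat.size (b + 1) := Nat.size_le_size (by omega)
    have : (2 : Int) ^ Nat.size (a + 1) ≤ 2 ^ Nat.size (b + 1) := by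
      apply pow_le_pow_right₀ <;> omega
    omega
  · exact List.pairwise_lt_range.imp (by omega)

theorem isPrimeA_one : isPrimeA 1 = false := by decide

-- L3: scanning the reversed list for the first prime = scanning bit-lengths downward
theorem firstPrime_rev (N : Nat) (h : 1 ≤ N) :
    firstPrimeA (liSpec N).reverse = scanK (Nat.size N) := by
  induction N with
  | zero => omega
  | succ N ih =>
    by_cases hN : 1 ≤ N
    · rw [liSpec_succ, List.reverse_append]
      simp only [List.reverse_cons, List.reverse_nil, List.nil_append, List.singleton_append]
      show (if isPrimeA ((2:Int) ^ Nat.size (N+1) - 1) then (2:Int) ^ Nat.size (N+1) - 1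
            else firstPrimeA (liSpec N).reverse) = scanK (Nat.size (N + 1))
      rw [ih hN]
      rcases size_succ_cases N with hc | hc
      · rw [hc]
        have hs : 1 ≤ Nat.size N := by
          rw [Nat.one_le_iff_ne_zero, Ne, Nat.size_eq_zero]; omega
        obtain ⟨s, hs'⟩ : ∃ s, Nat.size N = s + 1 := ⟨Nat.size N - 1, by omega⟩
        rw [hs']
        by_cases hp : isPrimeA ((2:Int) ^ (s+1) - 1)
        · rw [scanK_succ]
          simp [hp]
        · simp [hp]
      · rw [hc, scanK_succ]
    · have hN0 : N = 0 := by omega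
      subst hN0
      show firstPrimeA (liSpec 1).reverse = scanK (Nat.size 1)
      have : liSpec 1 = [1] := by unfold liSpec; rfl
      rw [this, Nat.size_one]
      show (if isPrimeA 1 then (1:Int) else -1) = scanK 1
      rw [isPrimeA_one]
      show (-1 : Int) = if isPrimeA ((2:Int) ^ 1 - 1) then (2:Int) ^ 1 - 1 else -1
      norm_num [isPrimeA_one]

-- the two trial-division loops agree: B's while-loop = A's range(3, sqrt+1, 2) scan
theorem pyRange2_nil (a b : Int) (h : b ≤ a) : PySem.List.pyRange a b 2 = [] := by
  rw [PySem.List.pyRange_of_pos a b (by omega)]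
  simp [show ¬ (a < b) by omega]

theorem pyRange2_cons (a b : Int) (h : a < b) :
    PySem.List.pyRange a b 2 = a :: PySem.List.pyRange (a + 2) b 2 := by
  rw [PySem.List.pyRange_of_pos a b (by omega), PySem.List.pyRange_of_pos (a + 2) b (by omega)]
  simp only [if_pos h]
  have hif : (if a + 2 < b then ((b - (a + 2) + 2 - 1) / 2).toNat else 0)
      = ((b - (a + 2) + 2 - 1) / 2).toNat := by
    split_ifs with hlt
    · rfl
    · omega
  rw [hif]
  have he : ((b - a + 2 - 1) / 2).toNat = ((b - (a + 2) + 2 - 1) / 2).toNat + 1 := by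
    omega
  rw [he, List.range_succ_eq_map]
  simp only [List.map_cons, List.map_map]
  refine List.cons_eq_cons.mpr ⟨by norm_num, ?_⟩
  apply List.map_congr_left
  intro k _
  simp
  ring

theorem fmod_of_pos (a b : Int) (hb : 0 ≤ b) : Int.fmod a b = a % b := by
  rw [Int.fmod_eq_emod]
  simp [hb]

theorem trialB_eq_range (fuel d N : Nat) (hd : 3 ≤ d) (hfuel : N + 2 ≤ fuel + d) :
    trialB N fuel d
      = (PySem.List.pyRange (d : Int) ((Nat.sqrt N : Int) + 1) 2).all
          (fun i => !(PySem.Int.mod (N : Int) i == 0)) := by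
  induction fuel generalizing d with
  | zero =>
    rw [pyRange2_nil]
    · rfl
    · have : Nat.sqrt N ≤ N := Nat.sqrt_le_self N
      omega
  | succ fuel ih =>
    show (if d * d ≤ N then (if N % d == 0 then false else trialB N fuel (d + 2)) else true) = _
    by_cases hdd : d * d ≤ N
    · have hds : d ≤ Nat.sqrt N := Nat.le_sqrt'.mpr (by nlinarith)
      rw [pyRange2_cons _ _ (by push_cast; omega)]
      simp only [List.all_cons, if_pos hdd]
      have hmod : PySem.Int.mod (N : Int) (d : Int) = ((N % d : Nat) : Int) := by
        rw [PySem.Int.mod, fmod_of_pos _ _ (by positivity)]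
        push_cast
        rfl
      by_cases hz : N % d = 0
      · simp [hmod, hz]
      · have : ¬ ((N % d : Nat) : Int) == 0 := by
          simp only [beq_iff_eq]
          push_cast
          omega
        simp only [hmod, this, Bool.not_false, Bool.true_and,
          show (N % d == 0) = false by simp [hz], Bool.false_eq_true, if_false]
        have : ((d : Int) + 2) = ((d + 2 : Nat) : Int) := by push_cast; ring
        rw [this]
        exact ih (d + 2) (by omega) (by omega)
    · have hds : Nat.sqrt N < d := by
        rw [Nat.sqrt_lt']
        nlinarith
      rw [pyRange2_nil _ _ (by push_cast; omega)]
      simp [hdd]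

-- the two primality tests agree on odd m ≥ 3
theorem isPrime_agree (m : Int) (h3 : 3 ≤ m) (hodd : PySem.Int.mod m 2 = 1) :
    isPrimeA m = isPrimeB m := by
  have hm2 : ¬ (m == 2) := by simp; omega
  have hodd' : m % 2 = 1 := by rw [← fmod_of_pos m 2 (by norm_num)]; exact hodd
  have hmod : ¬ (PySem.Int.mod m 2 == 0) := by simp [hodd']
  have hlt : ¬ (m < 2) := by omega
  unfold isPrimeA isPrimeB
  simp only [hm2, hmod, hlt, Bool.false_eq_true, if_false, Bool.or_self, decide_false,
    Bool.or_false, decide_true, decide_eq_true_eq]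
  rw [trialB_eq_range (m.toNat + 1) 3 m.toNat (by omega) (by omega)]
  have : ((m.toNat : Nat) : Int) = m := Int.toNat_of_nonneg (by omega)
  rw [this]
  rfl

-- Mersenne numbers 2^(k+2)-1 are ≥ 3 and odd
theorem mers_ge_three (k : Nat) : (3 : Int) ≤ 2 ^ (k + 2) - 1 := by
  have : (4 : Int) ≤ 2 ^ (k + 2) := by
    calc (4 : Int) = 2 ^ 2 := by norm_num
    _ ≤ 2 ^ (k + 2) := by apply pow_le_pow_right₀ <;> omega
  omega

theorem mers_odd (k : Nat) : PySem.Int.mod ((2 : Int) ^ (k + 2) - 1) 2 = 1 := by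
  obtain ⟨c, hc⟩ : (2 : Int) ∣ 2 ^ (k + 2) := dvd_pow_self 2 (by omega)
  rw [PySem.Int.mod, fmod_of_pos _ _ (by norm_num), hc]
  omega

-- L4: the two descending scans agree for every bit-length
theorem scanK_eq_loopB (k : Nat) : scanK k = loopB k := by
  induction k with
  | zero => rfl
  | succ k ih =>
    match k, ih with
    | 0, _ => simp [scanK, loopB, isPrimeA_one]
    | k + 1, ih =>
      show (if isPrimeA ((2:Int) ^ (k+2) - 1) then (2:Int) ^ (k+2) - 1 else scanK (k+1))
          = (if (2:Nat) ≤ k + 2 then (if isPrimeB ((2:Int) ^ (k+2) - 1) then (2:Int) ^ (k+2) - 1 else loopB (k+1)) else -1)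
      rw [if_pos (show (2 : Nat) ≤ k + 2 by omega),
        isPrime_agree _ (mers_ge_three k) (mers_odd k), ih]

-- ===== VERDICT (by name: the statement is the Claim_ definition above) =====
theorem calHuge_spec : Claim_equal_calHuge := by
  intro n _
  unfold Spec_calHuge calHuge calHuge_alt
  by_cases h : n ≤ 1
  · have hnil : PySem.List.pyRange 2 (n + 1) 1 = [] :=
      PySem.List.pyRange_one_eq_nil (by omega)
    rw [hnil]
    simp only [List.foldl_nil]
    rw [sorted_rev_of_pairwise [1] (by simp)]
    have hmax : (max n 1).toNat = 1 := by
      rcases le_or_gt n 0 with h0 | h0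
      · rw [max_eq_right (by omega)]; rfl
      · have : n = 1 := by omega
        rw [this]; rfl
    rw [hmax, Nat.size_one]
    show (if isPrimeA 1 then (1:Int) else -1) = loopB 1
    rw [isPrimeA_one]
    rfl
  · have h2 : 2 ≤ n := by omega
    have hN : n = ((n.toNat : Nat) : Int) := (Int.toNat_of_nonneg (by omega)).symm
    have hN1 : 1 ≤ n.toNat := by omega
    rw [hN, build_eq_liSpec n.toNat hN1]
    show firstPrimeA (PySem.List.sorted (liSpec n.toNat) (fun x => x) true) = _
    rw [sorted_rev_of_pairwise _ (liSpec_pairwise n.toNat),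
      firstPrime_rev n.toNat hN1, scanK_eq_loopB]
    congr 2
    omega
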